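-- pv_equiv track=rewrite | github.com/marcsingleton/orthology_inference2023 | analysis/ortho_tree/bm_score/bm_score_calc.py | get_column_set
-- ===== SOURCE A (Python) =====
-- def get_column_set(alignment, seqids=None, cutoff=1):
--     if seqids is None:
--         seqids = list(alignment)
--     idx_seqs = [get_idx_seq(alignment[seqid]) for seqid in seqids]
--     column_set = set()
--     for col in set(zip(*idx_seqs)):
--         if col.count(('-', None)) >= cutoff * len(col):
--             continue
--         column_set.add(col)
--     return column_set
--
-- def get_idx_seq(seq):
--     i = 0
--     idx_seq = []
--     for sym in seq:
--         if sym == '.' or sym == '-':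
--             idx_seq.append(('-', None))
--         else:
--             idx_seq.append((sym, i))
--             i += 1
--     return idx_seq
-- ===== SOURCE B (Python) =====
-- def get_column_set(alignment, seqids=None, cutoff=1):
--     if seqids is None:
--         seqids = list(alignment)
--     seqs = [alignment[seqid] for seqid in seqids]
--     counters = [0] * len(seqs)
--     cols = []
--     for j in range(min(map(len, seqs), default=0)):
--         col = []
--         for k in range(len(seqs)):
--             sym = seqs[k][j]
--             if sym == '.' or sym == '-':
--                 col.append(('-', None))
--             else:
--                 col.append((sym, counters[k]))
--                 counters[k] += 1
--         cols.append(tuple(col))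
--     return {col for col in set(cols) if col.count(('-', None)) < cutoff * len(col)}
-- ===== Notes on version B (the rewrite author's own statement) =====
-- stated objective: alternative
-- what changed: B drops A's build-full-index-sequences-then-zip(*) transpose: it sweeps column index j once up to the shortest sequence length, maintaining one running residue counter per sequence, so the per-sequence idx_seq lists and the n-ary zip disappear.
import Mathlib
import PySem

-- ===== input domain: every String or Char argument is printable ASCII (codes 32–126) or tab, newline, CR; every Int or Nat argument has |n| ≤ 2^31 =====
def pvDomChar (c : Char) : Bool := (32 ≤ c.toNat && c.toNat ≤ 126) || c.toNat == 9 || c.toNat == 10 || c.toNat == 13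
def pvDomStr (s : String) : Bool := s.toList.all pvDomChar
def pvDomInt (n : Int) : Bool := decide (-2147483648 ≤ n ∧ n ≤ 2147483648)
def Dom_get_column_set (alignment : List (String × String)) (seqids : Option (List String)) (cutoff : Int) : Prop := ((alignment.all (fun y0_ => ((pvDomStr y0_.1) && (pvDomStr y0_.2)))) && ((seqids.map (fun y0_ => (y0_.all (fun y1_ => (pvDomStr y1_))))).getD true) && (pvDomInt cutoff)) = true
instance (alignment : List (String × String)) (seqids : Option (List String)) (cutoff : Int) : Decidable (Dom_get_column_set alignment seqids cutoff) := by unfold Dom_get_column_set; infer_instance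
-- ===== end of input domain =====

-- B replaces A's build-all-index-sequences-then-zip(*) transpose by one column-wise sweep with
-- running per-sequence residue counters (alternative decomposition; equivalence of RETURN values proved).

-- ===== PORT A =====

-- the loop of get_idx_seq (append at the tail ≡ cons, carrying the running index i)
def pvIdxSeqAux : Int → List Char → List (String × Option Int)
  | _, [] => []
  | i, sym :: rest =>
    if sym = '.' ∨ sym = '-' then ("-", none) :: pvIdxSeqAux i rest
    else (String.ofList [sym], some i) :: pvIdxSeqAux (i + 1) rest

def get_idx_seq (seq : String) : List (String × Option Int) := pvIdxSeqAux 0 seq.toList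

-- n-ary zip(*xss): heads of all rows (none when some row is exhausted)
def pvHeadsTails {α : Type} : List (List α) → Option (List α × List (List α))
  | [] => some ([], [])
  | [] :: _ => none
  | (x :: xs) :: rest =>
    match pvHeadsTails rest with
    | none => none
    | some (hs, ts) => some (x :: hs, xs :: ts)

def pvZipRows {α : Type} : List α → List (List α) → List (List α)
  | [], _ => []
  | x :: xs, rest =>
    match pvHeadsTails rest with
    | none => []
    | some (hs, ts) => (x :: hs) :: pvZipRows xs ts

-- zip(*xss); zip() of no iterables is empty
def pvZipStar {α : Type} : List (List α) → List (List α)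
  | [] => []
  | l :: rest => pvZipRows l rest

def get_column_set (alignment : List (String × String)) (seqids : Option (List String)) (cutoff : Int) : List (List (String × Option Int)) :=
  let d := PySem.Dict.ofList alignment
  let ids := match seqids with
    | none => d.keys
    | some l => l
  let idx_seqs := ids.map (fun seqid => get_idx_seq (d.getD seqid ""))
  (PySem.Set.ofList (pvZipStar idx_seqs)).foldl
    (fun column_set col =>
      if ((col.count (("-", none) : String × Option Int) : Nat) : Int) ≥ cutoff * (col.length : Int)
      then column_set
      else PySem.Set.add column_set col)
    PySem.Set.empty

-- ===== PORT B =====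

-- min(map(len, seqs), default=0)
def pvMinLen {α : Type} (xss : List (List α)) : Nat :=
  match xss.map List.length with
  | [] => 0
  | x :: xs => xs.foldl min x

-- inner loop of B: one column at position j, threading (column, new counters) over zip(seqs, counters)
def pvColStep : Nat → List (List Char × Int) → List (String × Option Int) × List Int
  | _, [] => ([], [])
  | j, (s, c) :: rest =>
    let sym := s.getD j ' '
    if sym = '.' ∨ sym = '-' then
      let (col, cs) := pvColStep j rest
      (("-", none) :: col, c :: cs)
    else
      let (col, cs) := pvColStep j rest
      ((String.ofList [sym], some c) :: col, (c + 1) :: cs)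

def get_column_set_alt (alignment : List (String × String)) (seqids : Option (List String)) (cutoff : Int) : List (List (String × Option Int)) :=
  let d := PySem.Dict.ofList alignment
  let ids := match seqids with
    | none => d.keys
    | some l => l
  let seqs := ids.map (fun seqid => (d.getD seqid "").toList)
  let st := (List.range (pvMinLen seqs)).foldl
    (fun (st : List Int × List (List (String × Option Int))) j =>
      let (col, cs) := pvColStep j (seqs.zip st.1)
      (cs, st.2 ++ [col]))
    (List.replicate seqs.length 0, [])
  (PySem.Set.ofList st.2).foldl
    (fun column_set col =>
      if ((col.count (("-", none) : String × Option Int) : Nat) : Int) < cutoff * (col.length : Int)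
      then PySem.Set.add column_set col
      else column_set)
    PySem.Set.empty

-- ===== PRECONDITION & SPEC =====
-- Pre_ excludes exactly the inputs on which Python A raises KeyError: an explicit seqids list
-- containing an id that is not a key of alignment.
def Pre_get_column_set (alignment : List (String × String)) (seqids : Option (List String)) (cutoff : Int) : Prop :=
  ((seqids.getD []).all (fun seqid => (alignment.map Prod.fst).contains seqid)) = true
instance (alignment : List (String × String)) (seqids : Option (List String)) (cutoff : Int) : Decidable (Pre_get_column_set alignment seqids cutoff) := by unfold Pre_get_column_set; infer_instance

def pvWitness_get_column_set : (List (String × String)) × Option (List String) × Int :=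
  ([("a", "AC-"), ("b", "A.G")], some ["b", "a"], 1)

def Spec_get_column_set (alignment : List (String × String)) (seqids : Option (List String)) (cutoff : Int) (out : List (List (String × Option Int))) : Prop := out = get_column_set_alt alignment seqids cutoff
instance (alignment : List (String × String)) (seqids : Option (List String)) (cutoff : Int) (out : List (List (String × Option Int))) : Decidable (Spec_get_column_set alignment seqids cutoff out) := by unfold Spec_get_column_set; infer_instance

-- ===== CLAIM (what is proved, stated in full; the proofs are below) =====
def Claim_equal_get_column_set : Prop := ∀ (alignment : List (String × String)) (seqids : Option (List String)) (cutoff : Int), Dom_get_column_set alignment seqids cutoff → Pre_get_column_set alignment seqids cutoff → Spec_get_column_set alignment seqids cutoff (get_column_set alignment seqids cutoff)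

-- ===== LEMMAS AND PROOFS =====

-- canonical description of one column entry: symbol at j with its residue index
def pvCnt (s : List Char) (j : Nat) : Int :=
  (((s.take j).countP (fun c => !(decide (c = '.' ∨ c = '-')))) : Nat)

def pvEntry (s : List Char) (j : Nat) : String × Option Int :=
  if s.getD j ' ' = '.' ∨ s.getD j ' ' = '-' then ("-", none)
  else (String.ofList [s.getD j ' '], some (pvCnt s j))

theorem pvCnt_zero (s : List Char) : pvCnt s 0 = 0 := by simp [pvCnt]

theorem pvCnt_cons (c : Char) (rest : List Char) (j : Nat) :
    pvCnt (c :: rest) (j + 1) = (if c = '.' ∨ c = '-' then 0 else 1) + pvCnt rest j := by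
  by_cases hc : c = '.' ∨ c = '-'
  · rcases hc with hc | hc <;> simp [pvCnt, List.take_succ_cons, hc]
  · have hc1 : ¬ c = '.' := fun h => hc (Or.inl h)
    have hc2 : ¬ c = '-' := fun h => hc (Or.inr h)
    simp [pvCnt, List.take_succ_cons, hc1, hc2]
    omega

theorem pvCnt_succ (s : List Char) (n : Nat) (h : n < s.length) :
    pvCnt s (n + 1) = pvCnt s n + (if s.getD n ' ' = '.' ∨ s.getD n ' ' = '-' then 0 else 1) := by
  have hd : s.getD n ' ' = s[n] := List.getD_eq_getElem s ' ' h
  rw [pvCnt, pvCnt, List.take_add_one, List.getElem?_eq_getElem h]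
  simp only [Option.toList_some, List.countP_append, List.countP_cons, List.countP_nil, hd]
  by_cases hc : s[n] = '.' ∨ s[n] = '-'
  · rcases hc with hc | hc <;> simp [hc]
  · have hc1 : ¬ s[n] = '.' := fun hx => hc (Or.inl hx)
    have hc2 : ¬ s[n] = '-' := fun hx => hc (Or.inr hx)
    simp [hc1, hc2]

theorem pvIdxSeqAux_eq (s : List Char) : ∀ i : Int,
    pvIdxSeqAux i s = (List.range s.length).map
      (fun j => if s.getD j ' ' = '.' ∨ s.getD j ' ' = '-' then ("-", none)
                else (String.ofList [s.getD j ' '], some (i + pvCnt s j))) := by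
  induction s with
  | nil => intro i; simp [pvIdxSeqAux]
  | cons c rest ih =>
    intro i
    rw [List.length_cons, List.range_succ_eq_map, List.map_cons, List.map_map]
    by_cases hc : c = '.' ∨ c = '-'
    · rw [pvIdxSeqAux, if_pos hc, ih i]
      congr 1
      · simp [hc]
      · apply List.map_congr_left
        intro j hj
        simp [Function.comp, pvCnt_cons, hc]
    · rw [pvIdxSeqAux, if_neg hc, ih (i + 1)]
      congr 1
      · simp [hc, pvCnt_zero]
      · apply List.map_congr_left
        intro j hj
        by_cases hr : rest.getD j ' ' = '.' ∨ rest.getD j ' ' = '-' <;>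
          simp [Function.comp, pvCnt_cons, hc] <;> ring

theorem pvIdxSeqAux_length (s : List Char) (i : Int) :
    (pvIdxSeqAux i s).length = s.length := by
  rw [pvIdxSeqAux_eq]; simp

theorem pvFoldlMin_le_init : ∀ (xs : List Nat) (a : Nat), xs.foldl min a ≤ a := by
  intro xs
  induction xs with
  | nil => intro a; simp
  | cons x xs ih => intro a; exact le_trans (ih (min a x)) (min_le_left a x)

theorem pvFoldlMin_le_mem : ∀ (xs : List Nat) (a x : Nat), x ∈ xs → xs.foldl min a ≤ x := by
  intro xs
  induction xs with
  | nil => intro a x hx; simp at hx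
  | cons y ys ih =>
    intro a x hx
    rcases List.mem_cons.mp hx with h | h
    · subst h; exact le_trans (pvFoldlMin_le_init ys (min a x)) (min_le_right a x)
    · exact ih (min a y) x h

theorem pvFoldlMin_succ : ∀ (xs : List Nat) (a : Nat),
    (xs.map (· + 1)).foldl min (a + 1) = xs.foldl min a + 1 := by
  intro xs
  induction xs with
  | nil => intro a; simp
  | cons x xs ih => intro a; simp only [List.map_cons, List.foldl_cons, Nat.succ_min_succ]; exact ih (min a x)

theorem pvMinLen_congr {α β : Type} (xss : List (List α)) (yss : List (List β))
    (h : xss.map List.length = yss.map List.length) : pvMinLen xss = pvMinLen yss := by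
  unfold pvMinLen; rw [h]

theorem pvMinLen_le {α : Type} (xss : List (List α)) (l : List α) (h : l ∈ xss) :
    pvMinLen xss ≤ l.length := by
  have hm : l.length ∈ xss.map List.length := List.mem_map_of_mem h
  unfold pvMinLen
  cases heq : xss.map List.length with
  | nil => rw [heq] at hm; simp at hm
  | cons x xs =>
    rw [heq] at hm
    rcases List.mem_cons.mp hm with h1 | h1
    · rw [← h1]; exact pvFoldlMin_le_init xs l.length
    · exact pvFoldlMin_le_mem xs x l.length h1

theorem pvMinLen_eq_zero_of_mem_nil {α : Type} (xss : List (List α)) (h : ∃ t ∈ xss, t = []) :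
    pvMinLen xss = 0 := by
  rcases h with ⟨t, ht, rfl⟩
  exact Nat.le_zero.mp (pvMinLen_le xss [] ht)

theorem pvHeadsTails_none {α : Type} : ∀ (xss : List (List α)),
    pvHeadsTails xss = none → ∃ t ∈ xss, t = [] := by
  intro xss
  induction xss with
  | nil => intro h; simp [pvHeadsTails] at h
  | cons l rest ih =>
    intro h
    cases l with
    | nil => exact ⟨[], List.mem_cons_self, rfl⟩
    | cons x xs =>
      rw [pvHeadsTails] at h
      cases hr : pvHeadsTails rest with
      | none =>
        rcases ih hr with ⟨t, ht, h0⟩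
        exact ⟨t, List.mem_cons_of_mem _ ht, h0⟩
      | some p => rw [hr] at h; simp at h

theorem pvHeadsTails_some {α : Type} (d : α) : ∀ (xss : List (List α)) (hs : List α) (ts : List (List α)),
    pvHeadsTails xss = some (hs, ts) →
      (∀ t ∈ xss, t ≠ []) ∧ hs = xss.map (fun t => t.getD 0 d) ∧ ts = xss.map List.tail := by
  intro xss
  induction xss with
  | nil =>
    intro hs ts h
    simp only [pvHeadsTails, Option.some.injEq, Prod.mk.injEq] at h
    simp [← h.1, ← h.2]
  | cons l rest ih =>
    intro hs ts h
    cases l with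
    | nil => simp [pvHeadsTails] at h
    | cons x xs =>
      rw [pvHeadsTails] at h
      cases hr : pvHeadsTails rest with
      | none => rw [hr] at h; simp at h
      | some p =>
        rw [hr] at h
        simp only [Option.some.injEq, Prod.mk.injEq] at h
        rcases ih p.1 p.2 (by rw [hr]) with ⟨h1, h2, h3⟩
        refine ⟨?_, ?_, ?_⟩
        · intro t ht
          rcases List.mem_cons.mp ht with h4 | h4
          · subst h4; simp
          · exact h1 t h4
        · rw [← h.1, List.map_cons, ← h2]; simp
        · rw [← h.2, List.map_cons, ← h3]; simp

theorem pvZipRows_eq {α : Type} (d : α) : ∀ (l : List α) (rest : List (List α)),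
    pvZipRows l rest = (List.range (pvMinLen (l :: rest))).map
      (fun j => (l :: rest).map (fun t => t.getD j d)) := by
  intro l
  induction l with
  | nil =>
    intro rest
    have h0 : pvMinLen (([] : List α) :: rest) = 0 :=
      pvMinLen_eq_zero_of_mem_nil _ ⟨[], List.mem_cons_self, rfl⟩
    rw [h0]
    simp [pvZipRows]
  | cons x xs ih =>
    intro rest
    rw [pvZipRows]
    cases hht : pvHeadsTails rest with
    | none =>
      have h0 : pvMinLen ((x :: xs) :: rest) = 0 := by
        rcases pvHeadsTails_none rest hht with ⟨t, ht, h0⟩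
        exact pvMinLen_eq_zero_of_mem_nil _ ⟨t, List.mem_cons_of_mem _ ht, h0⟩
      rw [h0]; simp
    | some p =>
      obtain ⟨hs0, ts0⟩ := p
      rcases pvHeadsTails_some d rest hs0 ts0 hht with ⟨h1, h2, h3⟩
      have hlen : pvMinLen ((x :: xs) :: rest) = pvMinLen (xs :: rest.map List.tail) + 1 := by
        unfold pvMinLen
        simp only [List.map_cons, List.length_cons, List.map_map]
        have hmap : rest.map List.length = (rest.map (fun t => t.tail.length)).map (· + 1) := by
          rw [List.map_map]
          apply List.map_congr_left
          intro t ht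
          cases t with
          | nil => exact absurd rfl (h1 [] ht)
          | cons a b => simp
        rw [hmap, pvFoldlMin_succ]
        simp [Function.comp_def]
      dsimp only
      rw [hlen, List.range_succ_eq_map, List.map_cons, List.map_map, ih ts0]
      congr 1
      · rw [h2]; simp
      · rw [h3]
        apply List.map_congr_left
        intro j hj
        simp only [Function.comp, List.map_cons, List.map_map]
        congr 1
        apply List.map_congr_left
        intro t ht
        simp

theorem pvZipStar_eq {α : Type} (d : α) (xss : List (List α)) :
    pvZipStar xss = (List.range (pvMinLen xss)).map (fun j => xss.map (fun l => l.getD j d)) := by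
  cases xss with
  | nil => simp [pvZipStar, pvMinLen]
  | cons l rest => exact pvZipRows_eq d l rest

theorem pvColsA_eq (seqs : List (List Char)) :
    pvZipStar (seqs.map (fun s => pvIdxSeqAux 0 s))
      = (List.range (pvMinLen seqs)).map (fun j => seqs.map (fun s => pvEntry s j)) := by
  rw [pvZipStar_eq (("-", none) : String × Option Int)]
  have hml : pvMinLen (seqs.map (fun s => pvIdxSeqAux 0 s)) = pvMinLen seqs := by
    apply pvMinLen_congr
    rw [List.map_map]
    apply List.map_congr_left
    intro s _
    simp [Function.comp, pvIdxSeqAux_length]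
  rw [hml]
  apply List.map_congr_left
  intro j hj
  have hj' : j < pvMinLen seqs := List.mem_range.mp hj
  rw [List.map_map]
  apply List.map_congr_left
  intro s hs
  have hjs : j < s.length := lt_of_lt_of_le hj' (pvMinLen_le seqs s hs)
  simp only [Function.comp]
  rw [pvIdxSeqAux_eq]
  rw [List.getD_eq_getElem _ _ (by simpa using hjs)]
  simp only [List.getElem_map, List.getElem_range]
  by_cases hc : s.getD j ' ' = '.' ∨ s.getD j ' ' = '-' <;> simp [pvEntry]

theorem pvColStep_eq (n : Nat) : ∀ (ss : List (List Char)), (∀ s ∈ ss, n < s.length) →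
    pvColStep n (ss.zip (ss.map (fun s => pvCnt s n)))
      = (ss.map (fun s => pvEntry s n), ss.map (fun s => pvCnt s (n + 1))) := by
  intro ss
  induction ss with
  | nil => intro h; simp [pvColStep]
  | cons s rest ih =>
    intro h
    have hs : n < s.length := h s List.mem_cons_self
    have hrest := ih (fun t ht => h t (List.mem_cons_of_mem _ ht))
    simp only [List.map_cons, List.zip_cons_cons, pvColStep, hrest]
    by_cases hc : s.getD n ' ' = '.' ∨ s.getD n ' ' = '-'
    · rw [if_pos hc]
      rw [List.getD_eq_getElem?_getD] at hc
      rcases hc with hc | hc <;> simp [pvEntry, pvCnt_succ s n hs, hc]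
    · rw [if_neg hc]
      rw [List.getD_eq_getElem?_getD] at hc
      have hc1 : ¬ s[n]?.getD ' ' = '.' := fun hx => hc (Or.inl hx)
      have hc2 : ¬ s[n]?.getD ' ' = '-' := fun hx => hc (Or.inr hx)
      simp [pvEntry, pvCnt_succ s n hs, hc1, hc2]

theorem pvBLoop_eq (seqs : List (List Char)) : ∀ (n : Nat), n ≤ pvMinLen seqs →
    (List.range n).foldl
      (fun (st : List Int × List (List (String × Option Int))) j =>
        let (col, cs) := pvColStep j (seqs.zip st.1)
        (cs, st.2 ++ [col]))
      (List.replicate seqs.length 0, [])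
    = (seqs.map (fun s => pvCnt s n), (List.range n).map (fun j => seqs.map (fun s => pvEntry s j))) := by
  intro n
  induction n with
  | zero =>
    intro _
    simp only [List.range_zero, List.foldl_nil, List.map_nil]
    congr 1
    have h0 : seqs.map (fun s => pvCnt s 0) = seqs.map (fun _ => (0 : Int)) := by
      apply List.map_congr_left; intro s _; exact pvCnt_zero s
    rw [h0, List.map_const']
  | succ n ih =>
    intro hn
    have hn' : n ≤ pvMinLen seqs := Nat.le_of_succ_le hn
    rw [List.range_succ, List.foldl_append, ih hn', List.foldl_cons, List.foldl_nil]
    have hlt : ∀ s ∈ seqs, n < s.length := by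
      intro s hs
      exact lt_of_lt_of_le (lt_of_lt_of_le (Nat.lt_succ_self n) hn) (pvMinLen_le seqs s hs)
    simp only [pvColStep_eq n seqs hlt]
    simp [List.map_append]

theorem pvFoldFun_eq (cutoff : Int) :
    (fun (column_set : PySem.Set (List (String × Option Int))) col =>
      if ((col.count (("-", none) : String × Option Int) : Nat) : Int) ≥ cutoff * (col.length : Int)
      then column_set
      else PySem.Set.add column_set col)
    = (fun (column_set : PySem.Set (List (String × Option Int))) col =>
      if ((col.count (("-", none) : String × Option Int) : Nat) : Int) < cutoff * (col.length : Int)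
      then PySem.Set.add column_set col
      else column_set) := by
  funext cs col
  rcases lt_or_ge ((col.count (("-", none) : String × Option Int) : Nat) : Int) (cutoff * (col.length : Int)) with h | h
  · rw [if_neg (not_le.mpr h), if_pos h]
  · rw [if_pos h, if_neg (not_lt.mpr h)]

-- ===== VERDICT (by name: the statement is the Claim_ definition above) =====
theorem get_column_set_spec : Claim_equal_get_column_set := by
  intro alignment seqids cutoff _ _
  unfold Spec_get_column_set get_column_set get_column_set_alt get_idx_seq
  dsimp only
  rw [← pvFoldFun_eq cutoff]
  congr 1
  have hmm : ∀ (ids : List String),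
      ids.map (fun seqid => pvIdxSeqAux 0 ((PySem.Dict.ofList alignment).getD seqid "").toList)
        = (ids.map (fun seqid => ((PySem.Dict.ofList alignment).getD seqid "").toList)).map
            (fun s => pvIdxSeqAux 0 s) := by
    intro ids; rw [List.map_map]; rfl
  rw [hmm, pvColsA_eq, pvBLoop_eq _ _ le_rfl]
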